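-- pv_equiv track=rewrite | github.com/Madhax/Kata | codeforces/734-div3/b.py | solve
-- ===== SOURCE A (Python) =====
-- from collections import Counter
--
-- def solve(x):
--     #return max(map(int, list(str(num))))
--     d = Counter(x)
--
--     ret = 0
--     ctr = 0
--
--     for key in d.keys():
--         if d[key] >= 2:
--             ret += 1
--
--         elif d[key] == 1:
--             ctr += 1
--             if ctr == 2:
--                 ret += 1
--                 ctr = 0
--
--
--     return ret
-- ===== SOURCE B (Python) =====
-- def solve(x):
--     seen = set()
--     rep = set()
--     for c in x:
--         if c in seen:
--             rep.add(c)
--         else: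
--             seen.add(c)
--     return (len(seen) + len(rep)) // 2
-- ===== Notes on version B (the rewrite author's own statement) =====
-- stated objective: alternative
-- what changed: Drops the Counter entirely: B does a single pass over the characters maintaining two sets (seen, repeated) and returns (len(seen)+len(repeated))//2, instead of A's per-key loop over Counter entries with a stateful ctr-that-resets-at-2 accumulator.
import Mathlib
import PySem

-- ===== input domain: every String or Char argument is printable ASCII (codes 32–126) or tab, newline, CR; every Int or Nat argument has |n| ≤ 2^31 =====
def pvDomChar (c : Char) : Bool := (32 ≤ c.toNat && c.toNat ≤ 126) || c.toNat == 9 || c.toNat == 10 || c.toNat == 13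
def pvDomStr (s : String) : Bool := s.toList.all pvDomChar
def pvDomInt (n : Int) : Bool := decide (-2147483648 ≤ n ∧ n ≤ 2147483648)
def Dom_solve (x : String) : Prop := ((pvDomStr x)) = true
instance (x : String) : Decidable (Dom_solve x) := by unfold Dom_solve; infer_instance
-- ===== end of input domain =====

-- B drops the Counter: one pass over the characters with two sets (seen, repeated)
-- and the closed form (len(seen)+len(repeated))//2, instead of A's stateful
-- ctr-that-resets-at-2 loop over Counter keys (alternative decomposition, same cost).


-- ===== PORT A =====
-- the body of A's for-loop over d.keys(), state (ret, ctr)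
def solveStep (d : PySem.Dict Char Int) (s : Int × Int) (key : Char) : Int × Int :=
  if 2 ≤ d.getD key 0 then (s.1 + 1, s.2)
  else if d.getD key 0 = 1 then
    (if s.2 + 1 = 2 then (s.1 + 1, 0) else (s.1, s.2 + 1))
  else s

def solve (x : String) : Int :=
  let d := PySem.Dict.counter x.toList
  (d.keys.foldl (solveStep d) (0, 0)).1

-- ===== PORT B =====
-- the body of B's for-loop over the characters of x, state (seen, rep)
def solveAltStep (s : PySem.Set Char × PySem.Set Char) (c : Char) : PySem.Set Char × PySem.Set Char :=
  if PySem.Set.contains s.1 c then (s.1, PySem.Set.add s.2 c)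
  else (PySem.Set.add s.1 c, s.2)

def solve_alt (x : String) : Int :=
  let st := x.toList.foldl solveAltStep (PySem.Set.empty, PySem.Set.empty)
  PySem.Int.floordiv ((st.1.length : Int) + (st.2.length : Int)) 2

-- ===== PRECONDITION & SPEC =====
def Spec_solve (x : String) (out : Int) : Prop := out = solve_alt x
instance (x : String) (out : Int) : Decidable (Spec_solve x out) := by unfold Spec_solve; infer_instance

-- ===== CLAIM (what is proved, stated in full; the proofs are below) =====
def Claim_equal_solve : Prop := ∀ (x : String), Dom_solve x → Spec_solve x (solve x)

-- ===== LEMMAS AND PROOFS =====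

-- loop invariant for A's fold: starting from (ret, ctr) with ctr ∈ {0,1}, the fold adds
-- (number of keys with count ≥ 2) to ret and floor((ctr + singles)/2), and leaves (ctr + singles) % 2 in ctr
theorem solveLoop_inv (d : PySem.Dict Char Int) (ks : List Char)
    (h : ∀ k ∈ ks, 1 ≤ d.getD k 0) (ret : Int) (ctr : Nat) (hctr : ctr ≤ 1) :
    ks.foldl (solveStep d) (ret, (ctr : Int)) =
      (ret + (ks.countP (fun k => 2 ≤ d.getD k 0) : Int)
           + (((ctr + ks.countP (fun k => d.getD k 0 = 1)) / 2 : Nat) : Int),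
       (((ctr + ks.countP (fun k => d.getD k 0 = 1)) % 2 : Nat) : Int)) := by
  induction ks generalizing ret ctr with
  | nil => simp; omega
  | cons k ks ih =>
    have hk : 1 ≤ d.getD k 0 := h k (by simp)
    by_cases h2 : 2 ≤ d.getD k 0
    · simp only [List.foldl_cons, solveStep, if_pos h2,
        List.countP_cons, decide_eq_true_eq]
      rw [ih (fun a ha => h a (by simp [ha])) (ret + 1) ctr hctr]
      have hne : ¬ d.getD k 0 = 1 := by omega
      simp [hne]
      ring
    · have h1 : d.getD k 0 = 1 := by omega
      simp only [List.foldl_cons, solveStep, if_neg h2, if_pos h1,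
        List.countP_cons, decide_eq_true_eq]
      by_cases hc : ctr = 1
      · subst hc
        have : ((1 : Nat) : Int) + 1 = 2 := by norm_num
        rw [if_pos this,
          show ((ret + 1, (0 : Int)) : Int × Int) = (ret + 1, ((0 : Nat) : Int)) by norm_num,
          ih (fun a ha => h a (by simp [ha])) (ret + 1) 0 (by omega)]
        simp
        constructor
        · omega
        · omega
      · have hc0 : ctr = 0 := by omega
        subst hc0
        have : ¬ (((0 : Nat) : Int) + 1 = 2) := by norm_num
        rw [if_neg this,
          show ((ret, ((0 : Nat) : Int) + 1) : Int × Int) = (ret, ((1 : Nat) : Int)) by norm_num,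
          ih (fun a ha => h a (by simp [ha])) ret 1 (by omega)]
        simp
        constructor
        · omega
        · omega

-- loop invariant for B's fold: after processing l, seen = set(l) and rep is a
-- duplicate-free list whose members are exactly the characters occurring ≥ 2 times in l
theorem solveAltLoop_inv (l : List Char) :
    (l.foldl solveAltStep (PySem.Set.empty, PySem.Set.empty)).1 = PySem.Set.ofList l ∧
    (l.foldl solveAltStep (PySem.Set.empty, PySem.Set.empty)).2.Nodup ∧
    (∀ c, c ∈ (l.foldl solveAltStep (PySem.Set.empty, PySem.Set.empty)).2 ↔ 2 ≤ l.count c) := by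
  induction l using List.reverseRecOn with
  | nil => simp [PySem.Set.empty]
  | append_singleton l c ih =>
    obtain ⟨hs, hn, hm⟩ := ih
    rw [List.foldl_append, List.foldl_cons, List.foldl_nil]
    by_cases hmem : c ∈ l
    · have hcontains : PySem.Set.contains (l.foldl solveAltStep (PySem.Set.empty, PySem.Set.empty)).1 c = true := by
        rw [PySem.Set.contains_iff, hs, PySem.Set.mem_ofList]; exact hmem
      simp only [solveAltStep, hcontains, if_pos]
      refine ⟨by rw [hs, PySem.Set.ofList_append_singleton, PySem.Set.add_of_mem (by rw [PySem.Set.mem_ofList]; exact hmem)], PySem.Set.nodup_add _ c hn, ?_⟩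
      intro a
      rw [PySem.Set.mem_add, hm a, List.count_append, List.count_singleton]
      by_cases hac : a = c
      · subst hac
        have : 1 ≤ l.count a := List.count_pos_iff.mpr hmem
        simp; omega
      · rw [if_neg (fun h => hac (beq_iff_eq.mp h).symm)]
        simp [hac]
    · have hcontains : PySem.Set.contains (l.foldl solveAltStep (PySem.Set.empty, PySem.Set.empty)).1 c = false := by
        rw [← Bool.not_eq_true, PySem.Set.contains_iff, hs, PySem.Set.mem_ofList]; exact hmem
      simp only [solveAltStep, hcontains, Bool.false_eq_true, if_neg, not_false_iff]
      refine ⟨by rw [hs, PySem.Set.ofList_append_singleton], hn, ?_⟩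
      intro a
      rw [hm a, List.count_append, List.count_singleton]
      by_cases hac : a = c
      · subst hac
        have : l.count a = 0 := List.count_eq_zero.mpr hmem
        simp [this]
      · rw [if_neg (fun h => hac (beq_iff_eq.mp h).symm)]
        simp

-- ===== VERDICT (by name: the statement is the Claim_ definition above) =====
theorem solve_spec : Claim_equal_solve := by
  intro x _
  unfold Spec_solve solve solve_alt
  dsimp only
  set l := x.toList with hl
  have hmem : ∀ k ∈ (PySem.Dict.counter l).keys, 1 ≤ (PySem.Dict.counter l).getD k 0 := by
    intro k hk
    rw [PySem.Dict.getD_counter]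
    rw [PySem.Dict.keys_counter] at hk
    have : k ∈ l := by
      simpa using (PySem.Set.mem_ofList _ _).mp hk
    have := List.count_pos_iff.mpr this
    omega
  rw [show ((0,0) : Int × Int) = ((0 : Int), ((0 : Nat) : Int)) by norm_num,
    solveLoop_inv _ _ hmem 0 0 (by omega)]
  simp only [PySem.Dict.keys_counter, PySem.Dict.getD_counter]
  -- abbreviations for the distinct-character counts
  obtain ⟨hs, hn, hm⟩ := solveAltLoop_inv l
  rw [hs]
  -- rep has the same length as the filter of the dedup list by "count ≥ 2"
  have hperm : (l.foldl solveAltStep (PySem.Set.empty, PySem.Set.empty)).2.Perm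
      ((PySem.Set.ofList l).filter (fun c => decide (2 ≤ l.count c))) := by
    rw [List.perm_ext_iff_of_nodup hn (PySem.Set.nodup_ofList l |>.filter _)]
    intro a
    rw [hm a, List.mem_filter, PySem.Set.mem_ofList]
    constructor
    · intro h2
      exact ⟨List.count_pos_iff.mp (by omega), by simpa using h2⟩
    · intro ⟨_, h2⟩
      simpa using h2
  have hlen : (l.foldl solveAltStep (PySem.Set.empty, PySem.Set.empty)).2.length
      = (PySem.Set.ofList l).countP (fun c => decide (2 ≤ l.count c)) := by
    rw [hperm.length_eq]
    exact List.countP_eq_length_filter.symm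
  rw [hlen]
  -- distinct = pairs + singles since every distinct char has count ≥ 1
  have hsplit : (PySem.Set.ofList l).length
      = (PySem.Set.ofList l).countP (fun c => decide (2 ≤ l.count c))
        + (PySem.Set.ofList l).countP (fun c => decide (l.count c = 1)) := by
    rw [List.length_eq_countP_add_countP (p := fun c => decide (2 ≤ l.count c))]
    congr 1
    apply List.countP_congr
    intro a ha
    have : a ∈ l := (PySem.Set.mem_ofList _ _).mp ha
    have := List.count_pos_iff.mpr this
    simp only [decide_eq_true_eq]
    omega
  -- convert the Int-valued countPs on the A side to the Nat-valued ones
  have hA2 : (PySem.Set.ofList l).countP (fun k => decide (2 ≤ (l.count k : Int)))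
      = (PySem.Set.ofList l).countP (fun c => decide (2 ≤ l.count c)) := by
    apply List.countP_congr; intro a _; simp
  have hA1 : (PySem.Set.ofList l).countP (fun k => decide ((l.count k : Int) = 1))
      = (PySem.Set.ofList l).countP (fun c => decide (l.count c = 1)) := by
    apply List.countP_congr; intro a _
    simp only [decide_eq_true_eq]
    constructor
    · intro h; exact_mod_cast h
    · intro h; exact_mod_cast h
  rw [hA2, hA1]
  have hfd : PySem.Int.floordiv
      ((((PySem.Set.ofList l).length : Nat) : Int) + (((PySem.Set.ofList l).countP (fun c => decide (2 ≤ l.count c)) : Nat) : Int)) 2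
      = ((((PySem.Set.ofList l).length + (PySem.Set.ofList l).countP (fun c => decide (2 ≤ l.count c))) / 2 : Nat) : Int) := by
    rw [show (((PySem.Set.ofList l).length : Nat) : Int) + (((PySem.Set.ofList l).countP (fun c => decide (2 ≤ l.count c)) : Nat) : Int)
        = (((PySem.Set.ofList l).length + (PySem.Set.ofList l).countP (fun c => decide (2 ≤ l.count c)) : Nat) : Int) by push_cast; ring]
    exact PySem.Int.floordiv_natCast _ 2
  rw [hfd]
  push_cast
  omega
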